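-- pv_equiv track=rewrite | github.com/Leroll/paper-agent | src/paper_agent/main.py | build_token_summary
-- ===== SOURCE A (Python) =====
-- def build_token_summary(token_usage: dict) -> str:
--     summary = "\n\n---\n## 📊 Token 消耗统计\n\n"
--     if not token_usage:
--         return summary + "暂无 Token 消耗数据。\n"
--
--     summary += "| 节点 | 输入 Tokens | 输出 Tokens | 总计 Tokens |\n"
--     summary += "|---|---|---|---|\n"
--     total_in = total_out = total = 0
--     for node, usage in token_usage.items():
--         in_t = usage.get("input_tokens", 0)
--         out_t = usage.get("output_tokens", 0)
--         tot_t = usage.get("total_tokens", 0) or in_t + out_t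
--         total_in += in_t
--         total_out += out_t
--         total += tot_t
--         summary += f"| {node} | {in_t} | {out_t} | {tot_t} |\n"
--     summary += f"| **总计** | **{total_in}** | **{total_out}** | **{total}** |\n"
--     return summary
-- ===== SOURCE B (Python) =====
-- def _row(node, usage):
--     in_t = usage.get("input_tokens", 0)
--     out_t = usage.get("output_tokens", 0)
--     tot_t = usage.get("total_tokens", 0) or in_t + out_t
--     return (node, in_t, out_t, tot_t)
--
--
-- def build_token_summary(token_usage: dict) -> str:
--     header = "\n\n---\n## 📊 Token 消耗统计\n\n"
--     if not token_usage:
--         return header + "暂无 Token 消耗数据。\n"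
--     rows = [_row(node, usage) for node, usage in token_usage.items()]
--     total_in = sum(r[1] for r in rows)
--     total_out = sum(r[2] for r in rows)
--     total = sum(r[3] for r in rows)
--     body = "".join(f"| {n} | {i} | {o} | {t} |\n" for n, i, o, t in rows)
--     return (header
--             + "| 节点 | 输入 Tokens | 输出 Tokens | 总计 Tokens |\n"
--             + "|---|---|---|---|\n"
--             + body
--             + f"| **总计** | **{total_in}** | **{total_out}** | **{total}** |\n")
-- ===== Notes on version B (the rewrite author's own statement) =====
-- stated objective: alternative
-- what changed: A builds the string and three running totals in one accumulating loop; B first maps each entry to a (node,in,out,tot) row tuple, then computes the three totals as separate sums over the rows and builds the body by joining a comprehension.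
import Mathlib
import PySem

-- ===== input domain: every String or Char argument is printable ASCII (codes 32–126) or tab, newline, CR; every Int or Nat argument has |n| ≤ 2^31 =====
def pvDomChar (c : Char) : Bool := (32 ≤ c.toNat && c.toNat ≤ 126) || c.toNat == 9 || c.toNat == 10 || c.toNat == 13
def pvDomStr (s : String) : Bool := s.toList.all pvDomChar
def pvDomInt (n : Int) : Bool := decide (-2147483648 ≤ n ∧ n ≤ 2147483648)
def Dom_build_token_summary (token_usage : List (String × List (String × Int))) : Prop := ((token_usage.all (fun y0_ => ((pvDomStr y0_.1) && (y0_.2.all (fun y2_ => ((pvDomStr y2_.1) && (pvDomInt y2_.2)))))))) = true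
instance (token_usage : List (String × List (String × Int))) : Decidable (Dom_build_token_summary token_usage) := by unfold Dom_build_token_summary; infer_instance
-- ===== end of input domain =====

-- ===== PORT A =====
-- A builds the table and the three running totals in one accumulating loop.
def build_token_summary (token_usage : List (String × List (String × Int))) : String :=
  let summary := "\n\n---\n## 📊 Token 消耗统计\n\n"
  if token_usage.isEmpty then summary ++ "暂无 Token 消耗数据。\n"
  else
    let summary := summary ++ "| 节点 | 输入 Tokens | 输出 Tokens | 总计 Tokens |\n" ++ "|---|---|---|---|\n"
    let st := token_usage.foldl (fun (st : Int × Int × Int × String) p =>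
      let in_t := PySem.Dict.getD (PySem.Dict.mk p.2) "input_tokens" 0
      let out_t := PySem.Dict.getD (PySem.Dict.mk p.2) "output_tokens" 0
      let tot_t := let t := PySem.Dict.getD (PySem.Dict.mk p.2) "total_tokens" 0
                   if t = 0 then in_t + out_t else t
      (st.1 + in_t, st.2.1 + out_t, st.2.2.1 + tot_t,
       st.2.2.2 ++ "| " ++ p.1 ++ " | " ++ PySem.Int.toStr in_t ++ " | " ++ PySem.Int.toStr out_t ++ " | " ++ PySem.Int.toStr tot_t ++ " |\n"))
      (0, 0, 0, summary)
    st.2.2.2 ++ "| **总计** | **" ++ PySem.Int.toStr st.1 ++ "** | **" ++ PySem.Int.toStr st.2.1 ++ "** | **" ++ PySem.Int.toStr st.2.2.1 ++ "** |\n"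

-- ===== PORT B =====
-- B (alternative decomposition): map each entry to a row tuple, then three separate sums and a joined comprehension.
def pvRow (p : String × List (String × Int)) : String × Int × Int × Int :=
  let in_t := PySem.Dict.getD (PySem.Dict.mk p.2) "input_tokens" 0
  let out_t := PySem.Dict.getD (PySem.Dict.mk p.2) "output_tokens" 0
  let t := PySem.Dict.getD (PySem.Dict.mk p.2) "total_tokens" 0
  (p.1, in_t, out_t, if t = 0 then in_t + out_t else t)

def pvFmtRow (r : String × Int × Int × Int) : String :=
  "| " ++ r.1 ++ " | " ++ PySem.Int.toStr r.2.1 ++ " | " ++ PySem.Int.toStr r.2.2.1 ++ " | " ++ PySem.Int.toStr r.2.2.2 ++ " |\n"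

def build_token_summary_alt (token_usage : List (String × List (String × Int))) : String :=
  let header := "\n\n---\n## 📊 Token 消耗统计\n\n"
  if token_usage.isEmpty then header ++ "暂无 Token 消耗数据。\n"
  else
    let rows := token_usage.map pvRow
    let total_in := (rows.map (fun r => r.2.1)).sum
    let total_out := (rows.map (fun r => r.2.2.1)).sum
    let total := (rows.map (fun r => r.2.2.2)).sum
    let body := String.join (rows.map pvFmtRow)
    header ++ "| 节点 | 输入 Tokens | 输出 Tokens | 总计 Tokens |\n" ++ "|---|---|---|---|\n"
      ++ body ++ "| **总计** | **" ++ PySem.Int.toStr total_in ++ "** | **" ++ PySem.Int.toStr total_out ++ "** | **" ++ PySem.Int.toStr total ++ "** |\n"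

-- ===== PRECONDITION & SPEC =====
def Spec_build_token_summary (token_usage : List (String × List (String × Int))) (out : String) : Prop := out = build_token_summary_alt token_usage
instance (token_usage : List (String × List (String × Int))) (out : String) : Decidable (Spec_build_token_summary token_usage out) := by unfold Spec_build_token_summary; infer_instance

-- ===== CLAIM (what is proved, stated in full; the proofs are below) =====
def Claim_equal_build_token_summary : Prop := ∀ (token_usage : List (String × List (String × Int))), Dom_build_token_summary token_usage → Spec_build_token_summary token_usage (build_token_summary token_usage)

-- ===== LEMMAS AND PROOFS =====
-- prepending to a foldl-append (String.join) shifts into the accumulator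
theorem pv_join_shift {α : Type} (f : α → String) (l : List α) (s t : String) :
    s ++ l.foldl (fun x y => x ++ f y) t = l.foldl (fun x y => x ++ f y) (s ++ t) := by
  induction l generalizing t with
  | nil => rfl
  | cons p l ih => simp only [List.foldl_cons, ih, String.append_assoc]

-- A's loop state equals (sums of B's row tuples, prefix ++ joined formatted rows).
theorem pv_fold_eq (l : List (String × List (String × Int))) (a b c : Int) (s : String) :
    l.foldl (fun (st : Int × Int × Int × String) p =>
      let in_t := PySem.Dict.getD (PySem.Dict.mk p.2) "input_tokens" 0
      let out_t := PySem.Dict.getD (PySem.Dict.mk p.2) "output_tokens" 0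
      let tot_t := let t := PySem.Dict.getD (PySem.Dict.mk p.2) "total_tokens" 0
                   if t = 0 then in_t + out_t else t
      (st.1 + in_t, st.2.1 + out_t, st.2.2.1 + tot_t,
       st.2.2.2 ++ "| " ++ p.1 ++ " | " ++ PySem.Int.toStr in_t ++ " | " ++ PySem.Int.toStr out_t ++ " | " ++ PySem.Int.toStr tot_t ++ " |\n"))
      (a, b, c, s)
    = (a + ((l.map pvRow).map (fun r => r.2.1)).sum,
       b + ((l.map pvRow).map (fun r => r.2.2.1)).sum,
       c + ((l.map pvRow).map (fun r => r.2.2.2)).sum,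
       s ++ String.join ((l.map pvRow).map pvFmtRow)) := by
  induction l generalizing a b c s with
  | nil => simp [String.join]
  | cons p l ih =>
      simp only [List.foldl_cons, List.map_cons, List.sum_cons, String.join, List.foldl_map] at *
      rw [ih]
      simp [pvRow, pvFmtRow, add_assoc, String.append_assoc, pv_join_shift]

-- ===== VERDICT (by name: the statement is the Claim_ definition above) =====
theorem build_token_summary_spec : Claim_equal_build_token_summary := by
  intro l _
  unfold Spec_build_token_summary build_token_summary build_token_summary_alt
  by_cases h : l.isEmpty
  · simp [h]
  · simp only [h, if_false, Bool.false_eq_true]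
    rw [pv_fold_eq]
    simp [String.append_assoc]
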